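-- pv_equiv track=rewrite | github.com/GrandPurpleOcelot/Morse-Light-Translator-OpenCV | time_estimator.py | space_estimator
-- ===== SOURCE A (Python) =====
-- def space_estimator(input_string) -> list:
--     space_lengths = []
--     space_counter = 0
--
--     for i in input_string[1:]: # first itteration is alway a non-space character, so skip the first element
--         if i == ' ':
--             space_counter += 1
--         else:
--             space_lengths.append(space_counter)
--             space_counter = 0
--
--     return space_lengths
-- ===== SOURCE B (Python) =====
-- def space_estimator(input_string) -> list:
--     s = input_string[1:]
--     positions = [i for i, c in enumerate(s) if c != ' ']
--     if not positions:
--         return []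
--     return [positions[0]] + [b - a - 1 for a, b in zip(positions, positions[1:])]
-- ===== Notes on version B (the rewrite author's own statement) =====
-- stated objective: alternative
-- what changed: Replaces A's single accumulator loop (counting spaces, resetting on non-space) with an index-building pass (positions of non-space characters in input_string[1:]) followed by a gap-differencing pass over adjacent positions.
import Mathlib
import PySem

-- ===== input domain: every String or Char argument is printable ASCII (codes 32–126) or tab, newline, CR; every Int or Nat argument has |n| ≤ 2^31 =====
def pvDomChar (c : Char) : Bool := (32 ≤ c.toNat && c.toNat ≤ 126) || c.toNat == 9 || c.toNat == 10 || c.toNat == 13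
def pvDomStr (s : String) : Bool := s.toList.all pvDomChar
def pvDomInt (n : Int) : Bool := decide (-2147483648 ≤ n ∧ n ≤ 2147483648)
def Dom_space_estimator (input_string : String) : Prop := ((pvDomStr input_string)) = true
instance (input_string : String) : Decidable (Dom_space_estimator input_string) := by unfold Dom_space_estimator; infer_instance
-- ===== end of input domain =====

-- B replaces A's accumulator loop by a non-space-position table followed by adjacent-gap differencing (alternative decomposition, same cost).

-- ===== PORT A =====
-- literal port: for-loop over input_string[1:] carrying (space_lengths, space_counter)
def space_estimator (input_string : String) : List Int :=
  ((PySem.List.slice input_string.toList (some 1) none).foldl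
    (fun (st : List Int × Int) i => if i = ' ' then (st.1, st.2 + 1) else (st.1 ++ [st.2], 0))
    ([], 0)).1

-- ===== PORT B =====
-- literal port of Source B: positions of non-space chars in s = input_string[1:], then first position followed by adjacent differences minus one
def space_estimator_alt (input_string : String) : List Int :=
  match ((PySem.List.enumerate (PySem.List.slice input_string.toList (some 1) none) 0).filter
      (fun p => p.2 != ' ')).map (fun p => p.1) with
  | [] => []
  | p :: rest => p :: ((p :: rest).zip rest).map (fun q => q.2 - q.1 - 1)

-- ===== PRECONDITION & SPEC =====
def Spec_space_estimator (input_string : String) (out : List Int) : Prop := out = space_estimator_alt input_string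
instance (input_string : String) (out : List Int) : Decidable (Spec_space_estimator input_string out) := by unfold Spec_space_estimator; infer_instance

-- ===== CLAIM (what is proved, stated in full; the proofs are below) =====
def Claim_equal_space_estimator : Prop := ∀ (input_string : String), Dom_space_estimator input_string → Spec_space_estimator input_string (space_estimator input_string)

-- ===== LEMMAS AND PROOFS =====

-- A's loop as a structural recursion: g k l = outputs of A's loop started with counter k
def pvG (k : Int) : List Char → List Int
  | [] => []
  | c :: t => if c = ' ' then pvG (k + 1) t else k :: pvG 0 t

-- indices (starting at k) of the non-space characters
def pvPos (k : Int) : List Char → List Int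
  | [] => []
  | c :: t => if c = ' ' then pvPos (k + 1) t else k :: pvPos (k + 1) t

-- adjacent differences minus one, given the previous element
def pvDiffs (prev : Int) : List Int → List Int
  | [] => []
  | x :: t => (x - prev - 1) :: pvDiffs x t

theorem pvFoldA (l : List Char) : ∀ (acc : List Int) (k : Int),
    (l.foldl (fun (st : List Int × Int) i =>
      if i = ' ' then (st.1, st.2 + 1) else (st.1 ++ [st.2], 0)) (acc, k)).1 = acc ++ pvG k l := by
  induction l with
  | nil => intro acc k; simp [pvG]
  | cons c t ih =>
    intro acc k
    by_cases h : c = ' ' <;> simp [pvG, h, List.foldl_cons, ih]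

theorem pvPos_add (l : List Char) : ∀ (k c : Int), pvPos (k + c) l = (pvPos k l).map (· + c) := by
  induction l with
  | nil => intro k c; simp [pvPos]
  | cons x t ih =>
    intro k c
    by_cases h : x = ' '
    · simpa [pvPos, h, add_right_comm k c 1] using ih (k + 1) c
    · simp only [pvPos, if_neg h, List.map_cons]
      refine congrArg₂ List.cons rfl ?_
      rw [add_right_comm k c 1]; exact ih (k + 1) c

theorem pvDiffs_shift (l : List Int) : ∀ (prev c : Int),
    pvDiffs (prev + c) (l.map (· + c)) = pvDiffs prev l := by
  induction l with
  | nil => intro prev c; simp [pvDiffs]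
  | cons x t ih => intro prev c; simp [pvDiffs, ih]

theorem pvG_eq (l : List Char) : ∀ (k : Int),
    pvG k l = (match pvPos 0 l with
               | [] => ([] : List Int)
               | p :: rest => (p + k) :: pvDiffs p rest) := by
  induction l with
  | nil => intro k; simp [pvG, pvPos]
  | cons c t ih =>
    intro k
    by_cases h : c = ' '
    · have hpos : pvPos 0 (c :: t) = (pvPos 0 t).map (· + 1) := by
        simpa [pvPos, h] using pvPos_add t 0 1
      rw [pvG, if_pos h, ih (k + 1), hpos]
      cases hp : pvPos 0 t with
      | nil => simp
      | cons p rest =>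
        simp only [List.map_cons]
        have := pvDiffs_shift rest p 1
        rw [this]
        congr 1
        ring
    · have hpos : pvPos 0 (c :: t) = 0 :: (pvPos 0 t).map (· + 1) := by
        simp only [pvPos, if_neg h]
        congr 1
        simpa using pvPos_add t 0 1
      rw [pvG, if_neg h, ih 0, hpos]
      cases hp : pvPos 0 t with
      | nil => simp [pvDiffs]
      | cons p rest =>
        have hs := pvDiffs_shift rest p 1
        simp [pvDiffs, hs]

theorem pvPos_enum (l : List Char) : ∀ (k : Int),
    ((PySem.List.enumerate l k).filter (fun p => p.2 != ' ')).map (fun p => p.1) = pvPos k l := by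
  induction l with
  | nil => intro k; simp [PySem.List.enumerate_nil, pvPos]
  | cons c t ih =>
    intro k
    rw [PySem.List.enumerate_cons]
    by_cases h : c = ' ' <;> simp [pvPos, h, ih]

theorem pvZip_diffs (rest : List Int) : ∀ (p : Int),
    ((p :: rest).zip rest).map (fun q => q.2 - q.1 - 1) = pvDiffs p rest := by
  induction rest with
  | nil => intro p; simp [pvDiffs]
  | cons x t ih => intro p; simp [pvDiffs, List.zip_cons_cons, ih]

-- ===== VERDICT (by name: the statement is the Claim_ definition above) =====
theorem space_estimator_spec : Claim_equal_space_estimator := by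
  intro input_string _
  unfold Spec_space_estimator space_estimator space_estimator_alt
  rw [pvFoldA, pvPos_enum, pvG_eq]
  cases h : pvPos 0 (PySem.List.slice input_string.toList (some 1) none) with
  | nil => simp
  | cons p rest => simp [pvZip_diffs]
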